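-- pv_equiv track=rewrite | github.com/avdvnk/dopuski | nir/functions.py | interference_cancellation
-- ===== SOURCE A (Python) =====
-- def interference_cancellation(input_slots_state, buffer_size, frame_size, slot_number, subscriber_id):
--     recovered_messages = 0
--     for current_slot, current_messages in input_slots_state.items():
--         if subscriber_id in current_messages:
--             current_messages.remove(subscriber_id)
--     for current_slot, current_messages in input_slots_state.items():
--         if current_slot > slot_number:
--             break
--         if len(current_messages) == 1:
--             recovered_sub_id = current_messages[0]
--             recovered_messages += 1 + interference_cancellation(input_slots_state, buffer_size, frame_size,
--                                                                 slot_number, recovered_sub_id)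
--     return recovered_messages
-- ===== SOURCE B (Python) =====
-- def interference_cancellation(input_slots_state, buffer_size, frame_size, slot_number, subscriber_id):
--     # Non-mutating iterative peeling: keep only the slots before the first slot id
--     # greater than slot_number, strike the initial subscriber, then repeatedly
--     # clear the first singleton slot until none remains.
--     slots = []
--     for slot, msgs in input_slots_state.items():
--         if slot > slot_number:
--             break
--         slots.append(list(msgs))
--
--     def strike(x):
--         for msgs in slots:
--             if x in msgs:
--                 msgs.remove(x)
--
--     strike(subscriber_id)
--     count = 0
--     while True:
--         single = next((msgs for msgs in slots if len(msgs) == 1), None)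
--         if single is None:
--             return count
--         strike(single[0])
--         count += 1
-- ===== Notes on version B (the rewrite author's own statement) =====
-- stated objective: simpler
-- what changed: A's recursive successive-interference-cancellation that mutates the dict in place and re-scans it inside each recursive call is replaced by a flat non-mutating peeling loop: B copies only the slot prefix up to the first slot id beyond slot_number, strikes the initial subscriber once, and then repeatedly clears the first remaining singleton slot until none is left.
import Mathlib
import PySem

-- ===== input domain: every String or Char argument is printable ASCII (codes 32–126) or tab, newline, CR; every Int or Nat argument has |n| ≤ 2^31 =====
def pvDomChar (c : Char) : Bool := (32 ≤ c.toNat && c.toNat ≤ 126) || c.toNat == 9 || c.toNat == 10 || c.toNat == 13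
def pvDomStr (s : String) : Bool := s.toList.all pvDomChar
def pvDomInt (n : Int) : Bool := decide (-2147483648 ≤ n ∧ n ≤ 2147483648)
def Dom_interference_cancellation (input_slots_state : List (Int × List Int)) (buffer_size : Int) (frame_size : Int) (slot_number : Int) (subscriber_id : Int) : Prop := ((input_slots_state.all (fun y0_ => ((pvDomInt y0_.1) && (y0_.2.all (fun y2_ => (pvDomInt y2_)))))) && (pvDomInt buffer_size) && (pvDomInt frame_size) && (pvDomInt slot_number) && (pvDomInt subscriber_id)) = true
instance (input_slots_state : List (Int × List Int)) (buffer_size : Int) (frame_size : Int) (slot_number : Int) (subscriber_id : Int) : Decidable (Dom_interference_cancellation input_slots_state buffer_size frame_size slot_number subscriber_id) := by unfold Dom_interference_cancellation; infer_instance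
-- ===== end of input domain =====

-- B replaces A's recursive, dict-mutating scan by a flat non-mutating peeling loop over the
-- relevant slot prefix (objective: simpler); A mutates its dict argument in place, B does not —
-- the equivalence proved here is about the RETURN value only.

-- ===== PORT A =====
-- A's dict parameter: a Python dict is the association list with duplicate keys collapsed
-- (first position, last value), i.e. PySem.Dict.ofList; A mutates the lists in place, so the
-- port threads the dict state (keys never change, values do).

-- `if subscriber_id in current_messages: current_messages.remove(subscriber_id)` over all slots
def icRemoveAll (sid : Int) (st : List (Int × List Int)) : List (Int × List Int) :=
  st.map (fun p => (p.1, if sid ∈ p.2 then (PySem.List.remove? p.2 sid).getD p.2 else p.2))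

-- total number of buffered messages (fuel bound for A's recursion; each recursive call of A
-- removes at least one message before recursing further)
def icMu (st : List (Int × List Int)) : Nat := (st.map (fun p => p.2.length)).sum

mutual
-- body of `interference_cancellation(state, …, sid)`; fuel is a guard making the
-- recursion structural, it is never exhausted from the top-level call
def icRun (fuel : Nat) (st : List (Int × List Int)) (slot_number sid : Int) :
    Int × List (Int × List Int) :=
  match fuel with
  | 0 => (0, st)
  | fuel + 1 =>
      let st1 := icRemoveAll sid st
      icLoop fuel st1 slot_number 0 st1.length
termination_by (fuel, 0)

-- the second `for` loop: iterate the dict's n entries from position i, reading the CURRENT value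
def icLoop (fuel : Nat) (st : List (Int × List Int)) (slot_number : Int) (i n : Nat) :
    Int × List (Int × List Int) :=
  match n with
  | 0 => (0, st)
  | n + 1 =>
    match PySem.List.pyGet? st (i : Int) with
    | none => (0, st)
    | some p =>
      if slot_number < p.1 then (0, st)                 -- `if current_slot > slot_number: break`
      else if p.2.length == 1 then
        let r := icRun fuel st slot_number p.2.headI   -- current_messages[0] on a length-1 list
        let r2 := icLoop fuel r.2 slot_number (i + 1) n
        (1 + r.1 + r2.1, r2.2)
      else icLoop fuel st slot_number (i + 1) n
termination_by (fuel, n + 1)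
end

def interference_cancellation (input_slots_state : List (Int × List Int)) (buffer_size : Int) (frame_size : Int) (slot_number : Int) (subscriber_id : Int) : Int :=
  let st := (PySem.Dict.ofList input_slots_state).items
  (icRun (icMu st + 2) st slot_number subscriber_id).1

-- ===== PORT B =====
-- `strike(x)`: remove one occurrence of x from every slot that holds it
def bStrike (x : Int) (slots : List (List Int)) : List (List Int) :=
  slots.map (fun ms => if x ∈ ms then (PySem.List.remove? ms x).getD ms else ms)

def bMu (slots : List (List Int)) : Nat := (slots.map List.length).sum

theorem bStrike_mu_lt (x : Int) (slots : List (List Int)) (ms : List Int)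
    (hm : ms ∈ slots) (hx : x ∈ ms) : bMu (bStrike x slots) < bMu slots := by
  induction slots with
  | nil => cases hm
  | cons a l ih =>
    have hle : ∀ b : List Int,
        (if x ∈ b then (PySem.List.remove? b x).getD b else b).length ≤ b.length := by
      intro b
      by_cases hb : x ∈ b
      · simp [hb, PySem.List.remove?_eq_some_erase b x hb, List.length_erase_of_mem hb]
      · simp [hb]
    rcases List.mem_cons.mp hm with hm | hm
    · subst hm
      have h1 : (if x ∈ ms then (PySem.List.remove? ms x).getD ms else ms).length < ms.length := by
        simp [hx, PySem.List.remove?_eq_some_erase ms x hx, List.length_erase_of_mem hx]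
        have := List.length_pos_of_mem hx; omega
      have h2 : bMu (bStrike x l) ≤ bMu l := by
        simp only [bMu, bStrike, List.map_map]
        apply List.sum_le_sum
        intro b _; exact hle b
      simp only [bMu, bStrike, List.map_cons, List.sum_cons] at *
      omega
    · have := ih hm
      have h1 := hle a
      simp only [bMu, bStrike, List.map_cons, List.sum_cons] at *
      omega

-- the `while True` loop: clear the first singleton slot until none remains
def bLoop (slots : List (List Int)) (count : Int) : Int :=
  match h : slots.find? (fun ms => ms.length == 1) with
  | none => count
  | some ms => bLoop (bStrike ms.headI slots) (count + 1)
termination_by bMu slots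
decreasing_by
  have hm := List.mem_of_find?_eq_some h
  have hp := List.find?_some h
  have hlen : ms.length = 1 := by simpa using hp
  obtain ⟨a, rfl⟩ := List.length_eq_one_iff.mp hlen
  exact bStrike_mu_lt a slots [a] hm (by simp)

def interference_cancellation_alt (input_slots_state : List (Int × List Int)) (buffer_size : Int) (frame_size : Int) (slot_number : Int) (subscriber_id : Int) : Int :=
  let slots := (((PySem.Dict.ofList input_slots_state).items.takeWhile
      (fun p => decide (p.1 ≤ slot_number))).map Prod.snd)
  bLoop (bStrike subscriber_id slots) 0

-- ===== PRECONDITION & SPEC =====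
def Spec_interference_cancellation (input_slots_state : List (Int × List Int)) (buffer_size : Int) (frame_size : Int) (slot_number : Int) (subscriber_id : Int) (out : Int) : Prop := out = interference_cancellation_alt input_slots_state buffer_size frame_size slot_number subscriber_id
instance (input_slots_state : List (Int × List Int)) (buffer_size : Int) (frame_size : Int) (slot_number : Int) (subscriber_id : Int) (out : Int) : Decidable (Spec_interference_cancellation input_slots_state buffer_size frame_size slot_number subscriber_id out) := by unfold Spec_interference_cancellation; infer_instance

-- ===== CLAIM (what is proved, stated in full; the proofs are below) =====
def Claim_equal_interference_cancellation : Prop := ∀ (input_slots_state : List (Int × List Int)) (buffer_size : Int) (frame_size : Int) (slot_number : Int) (subscriber_id : Int), Dom_interference_cancellation input_slots_state buffer_size frame_size slot_number subscriber_id → Spec_interference_cancellation input_slots_state buffer_size frame_size slot_number subscriber_id (interference_cancellation input_slots_state buffer_size frame_size slot_number subscriber_id)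

-- ===== LEMMAS AND PROOFS =====

-- Both removal helpers are plain `List.erase` maps.
theorem strikeOne_eq (x : Int) (ms : List Int) :
    (if x ∈ ms then (PySem.List.remove? ms x).getD ms else ms) = ms.erase x := by
  by_cases hx : x ∈ ms
  · simp [hx, PySem.List.remove?_eq_some_erase ms x hx]
  · simp [hx, List.erase_of_not_mem hx]

theorem icRemoveAll_eq (x : Int) (st : List (Int × List Int)) :
    icRemoveAll x st = st.map (fun p => (p.1, p.2.erase x)) := by
  unfold icRemoveAll
  exact List.map_congr_left (fun p _ => by rw [strikeOne_eq])

theorem bStrike_eq (x : Int) (slots : List (List Int)) :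
    bStrike x slots = slots.map (fun ms => ms.erase x) := by
  unfold bStrike
  exact List.map_congr_left (fun ms _ => by rw [strikeOne_eq])

-- the slot-value lists of the relevant prefix (what B works on)
def pvSlots (slot_number : Int) (st : List (Int × List Int)) : List (List Int) :=
  (st.takeWhile (fun p => decide (p.1 ≤ slot_number))).map Prod.snd

theorem map_fst_removeAll (x : Int) (st : List (Int × List Int)) :
    (icRemoveAll x st).map Prod.fst = st.map Prod.fst := by
  simp [icRemoveAll_eq, List.map_map, Function.comp_def]

theorem pvSlots_removeAll (slot_number x : Int) (st : List (Int × List Int)) :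
    pvSlots slot_number (icRemoveAll x st) = bStrike x (pvSlots slot_number st) := by
  simp only [pvSlots, icRemoveAll_eq, bStrike_eq, List.takeWhile_map, List.map_map,
    Function.comp_def]

theorem icMu_removeAll_le (x : Int) (st : List (Int × List Int)) :
    icMu (icRemoveAll x st) ≤ icMu st := by
  simp only [icMu, icRemoveAll_eq, List.map_map, Function.comp_def]
  apply List.sum_le_sum
  intro p _
  exact List.length_erase_le

theorem icMu_removeAll_lt (x : Int) (st : List (Int × List Int)) (p : Int × List Int)
    (hp : p ∈ st) (hx : x ∈ p.2) : icMu (icRemoveAll x st) < icMu st := by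
  induction st with
  | nil => cases hp
  | cons a l ih =>
    rcases List.mem_cons.mp hp with hp | hp
    · subst hp
      have h1 : (p.2.erase x).length < p.2.length := by
        rw [List.length_erase_of_mem hx]
        have := List.length_pos_of_mem hx; omega
      have h2 := icMu_removeAll_le x l
      simp only [icMu, icRemoveAll_eq, List.map_cons, List.sum_cons] at *
      omega
    · have h1 := ih hp
      have h2 : (a.2.erase x).length ≤ a.2.length := List.length_erase_le
      simp only [icMu, icRemoveAll_eq, List.map_cons, List.sum_cons] at *
      omega

theorem mem_pvSlots_idx (slot_number : Int) (st : List (Int × List Int)) (ms : List Int)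
    (h : ms ∈ pvSlots slot_number st) : ∃ (j : Nat) (hj : j < st.length), st[j].2 = ms := by
  simp only [pvSlots, List.mem_map] at h
  obtain ⟨p, hp, rfl⟩ := h
  have hmem : p ∈ st := (List.takeWhile_sublist _).mem hp
  obtain ⟨j, hj, hje⟩ := List.mem_iff_getElem.mp hmem
  exact ⟨j, hj, by rw [hje]⟩

-- the canonical greedy peeling on the full dict state (clear the first singleton prefix slot)
def fpeel (slot_number : Int) (st : List (Int × List Int)) : Int × List (Int × List Int) :=
  match h : (pvSlots slot_number st).find? (fun ms => ms.length == 1) with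
  | none => (0, st)
  | some ms =>
    let r := fpeel slot_number (icRemoveAll ms.headI st)
    (1 + r.1, r.2)
termination_by icMu st
decreasing_by
  have hm := List.mem_of_find?_eq_some h
  have hlen : ms.length = 1 := by simpa using List.find?_some h
  obtain ⟨a, rfl⟩ := List.length_eq_one_iff.mp hlen
  obtain ⟨j, hj, hje⟩ := mem_pvSlots_idx slot_number st [a] hm
  exact icMu_removeAll_lt a st st[j] (List.getElem_mem hj) (by rw [hje]; simp)

theorem fpeel_eq_none (slot_number : Int) (st : List (Int × List Int))
    (h : (pvSlots slot_number st).find? (fun ms => ms.length == 1) = none) :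
    fpeel slot_number st = (0, st) := by
  rw [fpeel]
  split <;> simp_all

theorem fpeel_eq_some (slot_number : Int) (st : List (Int × List Int)) (ms : List Int)
    (h : (pvSlots slot_number st).find? (fun ms => ms.length == 1) = some ms) :
    fpeel slot_number st = (1 + (fpeel slot_number (icRemoveAll ms.headI st)).1,
                            (fpeel slot_number (icRemoveAll ms.headI st)).2) := by
  rw [fpeel]
  split <;> simp_all

theorem fpeel_map_fst (slot_number : Int) (st : List (Int × List Int)) :
    (fpeel slot_number st).2.map Prod.fst = st.map Prod.fst := by
  fun_induction fpeel slot_number st with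
  | case1 st h => rfl
  | case2 st ms h r ih => exact ih.trans (map_fst_removeAll ms.headI st)

theorem fpeel_noSingle (slot_number : Int) (st : List (Int × List Int)) :
    (pvSlots slot_number (fpeel slot_number st).2).find? (fun ms => ms.length == 1) = none := by
  fun_induction fpeel slot_number st with
  | case1 st h => exact h
  | case2 st ms h r ih => exact ih

theorem bLoop_pvSlots (slot_number : Int) (st : List (Int × List Int)) (c : Int) :
    bLoop (pvSlots slot_number st) c = c + (fpeel slot_number st).1 := by
  fun_induction fpeel slot_number st generalizing c with
  | case1 st h =>
    rw [bLoop]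
    split <;> simp_all
  | case2 st ms h r ih =>
    rw [bLoop]
    split
    · simp_all
    · rename_i ms' h'
      rw [h] at h'
      obtain rfl : ms = ms' := by injection h'
      rw [← pvSlots_removeAll]
      show bLoop _ _ = c + (1 + (fpeel slot_number (icRemoveAll ms.headI st)).1)
      rw [ih]
      omega

-- generic positional characterisations of find?/takeWhile
theorem find?_eq_some_idx {a : Type} (l : List a) (p : a → Bool) (i : Nat) (hi : i < l.length)
    (h : ∀ j (hj : j < l.length), j < i → p l[j] = false) (hp : p l[i] = true) :
    l.find? p = some l[i] := by
  induction l generalizing i with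
  | nil => simp at hi
  | cons x t ih =>
    cases i with
    | zero => simp_all
    | succ i =>
      have hx : p x = false := h 0 (by simp) (by omega)
      rw [List.find?_cons, hx]
      simp only [List.getElem_cons_succ]
      exact ih i (by simpa using hi) (fun j hj hji => h (j + 1) (by simpa using hj) (by omega)) hp

theorem takeWhile_getElem_idx {a : Type} (l : List a) (p : a → Bool) (i : Nat) (hi : i < l.length)
    (h : ∀ j (hj : j < l.length), j ≤ i → p l[j] = true) :
    ∃ hlt : i < (l.takeWhile p).length, (l.takeWhile p)[i] = l[i] := by
  induction l generalizing i with
  | nil => simp at hi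
  | cons x t ih =>
    have hx : p x = true := h 0 (by simp) (by omega)
    rw [List.takeWhile_cons, hx]
    cases i with
    | zero => simp
    | succ i =>
      obtain ⟨hlt, he⟩ := ih i (by simpa using hi)
        (fun j hj hji => h (j + 1) (by simpa using hj) (by omega))
      exact ⟨by simpa using hlt, by simpa using he⟩

theorem takeWhile_eq_take_idx {a : Type} (l : List a) (p : a → Bool) (i : Nat) (hi : i < l.length)
    (h : ∀ j (hj : j < l.length), j < i → p l[j] = true) (hf : p l[i] = false) :
    l.takeWhile p = l.take i := by
  induction l generalizing i with
  | nil => simp at hi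
  | cons x t ih =>
    cases i with
    | zero => simp_all
    | succ i =>
      have hx : p x = true := h 0 (by simp) (by omega)
      rw [List.takeWhile_cons, hx, List.take_succ_cons]
      exact congrArg (x :: ·) (ih i (by simpa using hi)
        (fun j hj hji => h (j + 1) (by simpa using hj) (by omega)) hf)

-- A's loop on a state with no singleton prefix slot scans to the end and changes nothing
theorem icLoop_noSingle (fuel : Nat) (st : List (Int × List Int)) (slot_number : Int) (i n : Nat)
    (h0 : (pvSlots slot_number st).find? (fun ms => ms.length == 1) = none)
    (hpre : ∀ j (hj : j < st.length), j < i → st[j].1 ≤ slot_number) :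
    icLoop fuel st slot_number i n = (0, st) := by
  induction n generalizing i with
  | zero => rw [icLoop]
  | succ n ihn =>
    rw [icLoop]
    by_cases hi : i < st.length
    · rw [show PySem.List.pyGet? st (i : Int) = some st[i] from by
        simp [PySem.List.pyGet?_natCast, List.getElem?_eq_getElem hi]]
      by_cases hk : slot_number < st[i].1
      · simp [hk]
      · have hkle : st[i].1 ≤ slot_number := by omega
        have hall : ∀ j (hj : j < st.length), j ≤ i → (decide (st[j].1 ≤ slot_number)) = true := by
          intro j hj hji
          rcases Nat.lt_or_ge j i with hlt | hge
          · simpa using hpre j hj hlt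
          · have : j = i := by omega
            subst this; simpa using hkle
        obtain ⟨hlt, he⟩ := takeWhile_getElem_idx st (fun p => decide (p.1 ≤ slot_number)) i hi hall
        have hmem : st[i].2 ∈ pvSlots slot_number st := by
          have : (st.takeWhile (fun p => decide (p.1 ≤ slot_number)))[i] ∈
              st.takeWhile (fun p => decide (p.1 ≤ slot_number)) := List.getElem_mem hlt
          rw [he] at this
          exact List.mem_map_of_mem this
        have hlen : ¬ (st[i].2.length == 1) = true := List.find?_eq_none.mp h0 _ hmem
        simp only [hk, if_false, hlen]
        exact ihn (i + 1) (fun j hj hji => by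
          rcases Nat.lt_or_ge j i with hlt' | hge'
          · exact hpre j hj hlt'
          · have : j = i := by omega
            subst this; exact hkle)
    · rw [show PySem.List.pyGet? st (i : Int) = none from by
        simp only [PySem.List.pyGet?_natCast]
        exact List.getElem?_eq_none (by omega)]

-- getElem keys transfer along equal key lists
theorem fst_getElem_of_map_fst_eq (l l' : List (Int × List Int))
    (h : l.map Prod.fst = l'.map Prod.fst) (j : Nat) (hj : j < l.length) (hj' : j < l'.length) :
    l[j].1 = l'[j].1 := by
  have := congrArg (fun t => t[j]?) h
  simpa [List.getElem?_map, List.getElem?_eq_getElem hj, List.getElem?_eq_getElem hj'] using this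

-- THE MAIN SIMULATION: A's recursion computes exactly the canonical greedy peel
theorem ic_main (fuel : Nat) :
    (∀ (st : List (Int × List Int)) (slot_number sid : Int),
        icMu (icRemoveAll sid st) + 2 ≤ fuel →
        icRun fuel st slot_number sid = fpeel slot_number (icRemoveAll sid st)) ∧
    (∀ (st : List (Int × List Int)) (slot_number : Int) (i n : Nat),
        n + i = st.length → icMu st + 1 ≤ fuel →
        (∀ j (hj : j < st.length), j < i → st[j].1 ≤ slot_number ∧ st[j].2.length ≠ 1) →
        icLoop fuel st slot_number i n = fpeel slot_number st) := by
  induction fuel using Nat.strong_induction_on with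
  | _ fuel IH =>
  have hrun : ∀ (st : List (Int × List Int)) (slot_number sid : Int),
      icMu (icRemoveAll sid st) + 2 ≤ fuel →
      icRun fuel st slot_number sid = fpeel slot_number (icRemoveAll sid st) := by
    intro st slot_number sid hf
    obtain ⟨f, rfl⟩ : ∃ f, fuel = f + 1 := ⟨fuel - 1, by omega⟩
    rw [icRun]
    exact (IH f (by omega)).2 (icRemoveAll sid st) slot_number 0 _ rfl (by omega)
      (fun j hj hji => by omega)
  refine ⟨hrun, ?_⟩
  intro st slot_number i n
  induction n generalizing st i with
  | zero =>
    intro hn hf hpre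
    rw [icLoop, fpeel_eq_none]
    apply List.find?_eq_none.mpr
    intro ms hms
    obtain ⟨j, hj, rfl⟩ := mem_pvSlots_idx slot_number st ms hms
    simpa using (hpre j hj (by omega)).2
  | succ n ihn =>
    intro hn hf hpre
    have hi : i < st.length := by omega
    rw [icLoop]
    rw [show PySem.List.pyGet? st (i : Int) = some st[i] from by
      simp [PySem.List.pyGet?_natCast, List.getElem?_eq_getElem hi]]
    by_cases hk : slot_number < st[i].1
    · -- break: the prefix ends before i; nothing singleton in it
      simp only [hk, if_true]
      rw [fpeel_eq_none]
      apply List.find?_eq_none.mpr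
      intro ms hms
      rw [pvSlots, takeWhile_eq_take_idx st _ i hi
        (fun j hj hji => by simpa using (hpre j hj hji).1) (by simpa using hk)] at hms
      simp only [List.mem_map] at hms
      obtain ⟨p, hp, rfl⟩ := hms
      obtain ⟨j, hj, hje⟩ := List.mem_iff_getElem.mp hp
      have hjlen : j < st.length := by
        have := hj; simp [List.length_take] at this; omega
      have hji : j < i := by
        have := hj; simp [List.length_take] at this; omega
      rw [List.getElem_take] at hje
      subst hje
      simpa using (hpre j hjlen hji).2
    · have hkle : st[i].1 ≤ slot_number := by omega
      have hall : ∀ j (hj : j < st.length), j ≤ i → (decide (st[j].1 ≤ slot_number)) = true := by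
        intro j hj hji
        rcases Nat.lt_or_ge j i with hlt | hge
        · simpa using (hpre j hj hlt).1
        · have : j = i := by omega
          subst this; simpa using hkle
      obtain ⟨hlt, he⟩ := takeWhile_getElem_idx st (fun p => decide (p.1 ≤ slot_number)) i hi hall
      have hpvlen : i < (pvSlots slot_number st).length := by
        simpa [pvSlots] using hlt
      have hpvget : (pvSlots slot_number st)[i] = st[i].2 := by
        simp [pvSlots, he]
      by_cases hlen : st[i].2.length = 1
      · -- the singleton case: A recurses; the recursion clears the whole prefix
        have hbeq : (st[i].2.length == 1) = true := by simpa using hlen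
        simp only [hk, if_false, hbeq, if_true]
        obtain ⟨a, ha⟩ := List.length_eq_one_iff.mp hlen
        have hx : st[i].2.headI ∈ st[i].2 := by rw [ha]; simp
        have hmu : icMu (icRemoveAll st[i].2.headI st) < icMu st :=
          icMu_removeAll_lt _ st st[i] (List.getElem_mem hi) hx
        have hr := hrun st slot_number st[i].2.headI (by omega)
        rw [hr]
        set st2 := (fpeel slot_number (icRemoveAll st[i].2.headI st)).2 with hst2
        have hkeys : st2.map Prod.fst = st.map Prod.fst := by
          rw [hst2, fpeel_map_fst, map_fst_removeAll]
        have hlen2 : st2.length = st.length := by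
          have := congrArg List.length hkeys; simpa using this
        have hloop0 : icLoop fuel st2 slot_number (i + 1) n = (0, st2) := by
          apply icLoop_noSingle
          · rw [hst2]; exact fpeel_noSingle slot_number (icRemoveAll st[i].2.headI st)
          · intro j hj hji
            rw [fst_getElem_of_map_fst_eq st2 st hkeys j hj (by omega)]
            rcases Nat.lt_or_ge j i with hlt' | hge'
            · exact (hpre j (by omega) hlt').1
            · have : j = i := by omega
              subst this; exact hkle
        rw [hloop0]
        have hfind : (pvSlots slot_number st).find? (fun ms => ms.length == 1) = some st[i].2 := by
          rw [show some st[i].2 = some (pvSlots slot_number st)[i] from by rw [hpvget]]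
          apply find?_eq_some_idx _ _ i hpvlen
          · intro j hj hji
            have hjst : j < st.length := by omega
            have hje : (pvSlots slot_number st)[j] = st[j].2 := by
              obtain ⟨hlt', he'⟩ := takeWhile_getElem_idx st (fun p => decide (p.1 ≤ slot_number))
                j hjst (fun j' hj' hji' => hall j' hj' (by omega))
              simp [pvSlots, he']
            rw [hje]
            simpa using (hpre j hjst hji).2
          · rw [hpvget]; exact hbeq
        rw [fpeel_eq_some slot_number st st[i].2 hfind]
        exact Prod.ext (by show 1 + _ + (0:Int) = 1 + _; omega) rfl
      · have hbeq : (st[i].2.length == 1) = false := by simpa using hlen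
        simp only [hk, if_false, hbeq]
        exact ihn st (i + 1) (by omega) hf (fun j hj hji => by
          rcases Nat.lt_or_ge j i with hlt' | hge'
          · exact hpre j hj hlt'
          · have : j = i := by omega
            subst this; exact ⟨hkle, hlen⟩)

theorem interference_cancellation_spec : Claim_equal_interference_cancellation := by
  intro input_slots_state buffer_size frame_size slot_number subscriber_id _
  unfold Spec_interference_cancellation interference_cancellation interference_cancellation_alt
  set st := (PySem.Dict.ofList input_slots_state).items with hst
  have hA := (ic_main (icMu st + 2)).1 st slot_number subscriber_id
    (by have := icMu_removeAll_le subscriber_id st; omega)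
  show (icRun (icMu st + 2) st slot_number subscriber_id).1 =
    bLoop (bStrike subscriber_id (pvSlots slot_number st)) 0
  rw [hA]
  rw [← pvSlots_removeAll, bLoop_pvSlots]
  omega
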